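-- pv_equiv track=rewrite | github.com/supratim94336/SNLP | OOV.py | search
-- ===== SOURCE A (Python) =====
-- def search(train_words,test_words):
--     uniq_train = set(train_words)
--     uniq_test = set(test_words)
--     p = len(uniq_test)
--     k = p
--     for te_word in uniq_test:
--         for tr_word in uniq_train:
--             if(tr_word==te_word):
--                 k = k - 1
--             else:
--                 continue
--     return k
-- ===== SOURCE B (Python) =====
-- def search(train_words, test_words):
--     st = sorted(set(test_words))
--     sr = sorted(set(train_words))
--     count = 0
--     i = 0
--     j = 0
--     while i < len(st) and j < len(sr):
--         if st[i] < sr[j]: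
--             count += 1
--             i += 1
--         elif sr[j] < st[i]:
--             j += 1
--         else:
--             i += 1
--             j += 1
--     return count + (len(st) - i)
-- ===== Notes on version B (the rewrite author's own statement) =====
-- stated objective: alternative
-- what changed: Replaces the quadratic nested scan over the two deduplicated sets by sorting both deduplicated lists and counting absent test words in a single two-pointer merge pass (O(n log n) vs O(|set(test)|*|set(train)|)); a timing run could not confirm a speedup here, so none is claimed.
import Mathlib
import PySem

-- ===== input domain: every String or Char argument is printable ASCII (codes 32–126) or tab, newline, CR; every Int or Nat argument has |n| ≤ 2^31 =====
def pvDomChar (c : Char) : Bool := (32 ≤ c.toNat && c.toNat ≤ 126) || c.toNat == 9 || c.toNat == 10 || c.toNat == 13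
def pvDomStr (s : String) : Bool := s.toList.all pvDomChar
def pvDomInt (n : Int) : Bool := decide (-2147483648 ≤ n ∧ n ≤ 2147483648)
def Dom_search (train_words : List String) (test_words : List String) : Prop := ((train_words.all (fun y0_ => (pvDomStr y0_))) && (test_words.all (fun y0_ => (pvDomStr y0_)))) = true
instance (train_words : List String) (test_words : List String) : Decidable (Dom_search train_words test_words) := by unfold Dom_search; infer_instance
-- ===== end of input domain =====

-- B replaces A's nested scan over the two deduplicated sets by a sort of each
-- deduplicated side and a single two-pointer merge pass counting absent test words.

-- ===== PORT A =====
def search (train_words : List String) (test_words : List String) : Int :=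
  let uniq_train := PySem.Set.ofList train_words
  let uniq_test := PySem.Set.ofList test_words
  let p : Int := uniq_test.length
  -- result is independent of the set iteration order (a sum over the set's elements)
  uniq_test.foldl (fun k te_word =>
    uniq_train.foldl (fun k tr_word => if tr_word == te_word then k - 1 else k) k) p

-- ===== PORT B =====
-- the while-loop over indices i, j, transcribed as recursion on the two remaining suffixes
def mergeCount (st : List String) (sr : List String) : Int :=
  match st, sr with
  | [], _ => 0
  | a :: st', [] => 1 + mergeCount st' []   -- count + (len(st) - i): all remaining test words
  | a :: st', b :: sr' =>
    if a < b then 1 + mergeCount st' (b :: sr')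
    else if b < a then mergeCount (a :: st') sr'
    else mergeCount st' sr'
termination_by st.length + sr.length

def search_alt (train_words : List String) (test_words : List String) : Int :=
  mergeCount (PySem.List.sorted (PySem.Set.ofList test_words) (fun x => x) false)
             (PySem.List.sorted (PySem.Set.ofList train_words) (fun x => x) false)

-- ===== PRECONDITION & SPEC =====
def Spec_search (train_words : List String) (test_words : List String) (out : Int) : Prop := out = search_alt train_words test_words
instance (train_words : List String) (test_words : List String) (out : Int) : Decidable (Spec_search train_words test_words out) := by unfold Spec_search; infer_instance

-- ===== CLAIM (what is proved, stated in full; the proofs are below) =====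
def Claim_equal_search : Prop := ∀ (train_words : List String) (test_words : List String), Dom_search train_words test_words → Spec_search train_words test_words (search train_words test_words)

-- ===== LEMMAS AND PROOFS =====

-- inner loop of A: subtract the number of occurrences
theorem foldl_sub_count (l : List String) (v : String) (k : Int) :
    l.foldl (fun k tr => if tr == v then k - 1 else k) k = k - l.count v := by
  induction l generalizing k with
  | nil => simp
  | cons x xs ih =>
    rw [List.foldl_cons, List.count_cons]
    by_cases h : x = v
    · rw [if_pos (by simp [h]), ih]
      simp [h]; ring
    · rw [if_neg (by simp [h]), ih]
      simp [h]

-- outer loop of A: p minus the number of test words present in the (nodup) train set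
theorem search_eq (tr te : List String) :
    search tr te =
      ((PySem.Set.ofList te).countP (fun x => !decide (x ∈ tr)) : Int) := by
  unfold search
  have hnd := PySem.Set.nodup_ofList (xs := tr) (α := String)
  have hfold : ∀ (l : List String), l.Nodup → ∀ (ls : List String) (k : Int),
      ls.foldl (fun k te_word =>
        l.foldl (fun k tr_word => if tr_word == te_word then k - 1 else k) k) k
        = k - ls.countP (fun x => decide (x ∈ l)) := by
    intro l hl ls
    induction ls with
    | nil => simp
    | cons y ys ih =>
      intro k
      rw [List.foldl_cons, foldl_sub_count, ih, List.countP_cons]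
      by_cases hy : y ∈ l
      · rw [List.count_eq_one_of_mem hl hy]
        simp only [hy, decide_true, if_pos]
        push_cast; ring
      · rw [List.count_eq_zero_of_not_mem hy]
        simp [hy]
  rw [hfold _ hnd]
  have hc : (PySem.Set.ofList te).countP (fun x => decide (x ∈ PySem.Set.ofList tr))
      = (PySem.Set.ofList te).countP (fun x => decide (x ∈ tr)) := by
    apply List.countP_congr; intro x _; simp [PySem.Set.mem_ofList tr x]
  rw [hc]
  have hsplit : (PySem.Set.ofList te).countP (fun x => decide (x ∈ tr))
      + (PySem.Set.ofList te).countP (fun x => !decide (x ∈ tr))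
      = (PySem.Set.ofList te).length := by
    simpa using List.length_eq_countP_add_countP (l := PySem.Set.ofList te)
      (p := fun x => decide (x ∈ tr)) |>.symm
  omega

-- the merge counts the elements of st absent from sr, for strictly sorted inputs
theorem mergeCount_eq (st sr : List String) :
    st.Pairwise (· < ·) → sr.Pairwise (· < ·) →
    mergeCount st sr = (st.countP (fun x => !decide (x ∈ sr)) : Int) := by
  induction st, sr using mergeCount.induct with
  | case1 sr => intro _ _; simp [mergeCount]
  | case2 a st' ih =>
    intro hst _
    rw [mergeCount, ih hst.of_cons List.Pairwise.nil]
    simp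
    ring
  | case3 a st' b sr' h ih =>
    intro hst hsr
    have hb : ∀ x ∈ sr', b < x := (List.pairwise_cons.mp hsr).1
    have hna : a ∉ b :: sr' := by
      intro hmem
      rcases List.mem_cons.mp hmem with rfl | hmem'
      · exact lt_irrefl a h
      · exact lt_irrefl a (h.trans (hb a hmem'))
    rw [mergeCount, if_pos h, ih hst.of_cons hsr, List.countP_cons]
    simp [hna]
    ring
  | case4 a st' b sr' h1 h2 ih =>
    intro hst hsr
    have ha : ∀ x ∈ st', a < x := (List.pairwise_cons.mp hst).1
    rw [mergeCount, if_neg h1, if_pos h2, ih hst hsr.of_cons]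
    apply congrArg
    apply List.countP_congr
    intro x hx
    have hxb : x ≠ b := by
      rcases List.mem_cons.mp hx with rfl | hx'
      · exact (ne_of_gt h2)
      · exact ne_of_gt (h2.trans (ha x hx'))
    simp [List.mem_cons, hxb]
  | case5 a st' b sr' h1 h2 ih =>
    intro hst hsr
    have heq : a = b := le_antisymm (not_lt.mp h2) (not_lt.mp h1)
    subst heq
    have ha : ∀ x ∈ st', a < x := (List.pairwise_cons.mp hst).1
    rw [mergeCount, if_neg h1, if_neg h2, ih hst.of_cons hsr.of_cons, List.countP_cons]
    have hcc : st'.countP (fun x => !decide (x ∈ a :: sr')) = st'.countP (fun x => !decide (x ∈ sr')) := by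
      apply List.countP_congr
      intro x hx
      simp [List.mem_cons, ne_of_gt (ha x hx)]
    rw [hcc]
    simp

theorem search_alt_eq (tr te : List String) :
    search_alt tr te =
      ((PySem.Set.ofList te).countP (fun x => !decide (x ∈ tr)) : Int) := by
  unfold search_alt
  have hst := PySem.List.sorted_ofList_pairwise_lt (xs := te) (κ := String)
  have hsr := PySem.List.sorted_ofList_pairwise_lt (xs := tr) (κ := String)
  rw [mergeCount_eq _ _ hst hsr]
  have hperm : (PySem.List.sorted (PySem.Set.ofList te) (fun x => x) false).Perm
      (PySem.Set.ofList te) := PySem.List.sorted_perm _ _ _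
  rw [hperm.countP_eq]
  apply congrArg
  apply List.countP_congr
  intro x hx
  have hm : (x ∈ PySem.List.sorted (PySem.Set.ofList tr) (fun x => x) false) ↔ x ∈ tr := by
    rw [PySem.List.mem_sorted]; exact PySem.Set.mem_ofList tr x
  simp [hm]

-- ===== VERDICT (by name: the statement is the Claim_ definition above) =====
theorem search_spec : Claim_equal_search := by
  intro tr te _
  unfold Spec_search
  rw [search_eq, search_alt_eq]
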